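-- pv_equiv track=rewrite | github.com/R-Eatch/sc-project | singlecell-py/run_gland_HVGs.py | calculate_intersections
-- ===== SOURCE A (Python) =====
-- from itertools import combinations
--
-- def calculate_intersections(hvgs_dict, sample_names):
--     intersections = {}
--     selected_combinations = []  # 存储感兴趣的组合
--
--     # 两两交集
--     for comb in combinations(sample_names, 2):
--         selected_combinations.append(comb)
--
--     # 三 MG 样本交集
--     mg_samples = ["R-MG", "S-MG", "M-MG"]
--     selected_combinations.append(tuple(mg_samples))
--
--     # 所有六个样本的交集
--     selected_combinations.append(tuple(sample_names))
--
--     # 计算感兴趣的交集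
--     for comb in selected_combinations:
--         intersect_set = set.intersection(*(hvgs_dict[sample] for sample in comb))
--         intersections[comb] = len(intersect_set)
--
--     return intersections
-- ===== SOURCE B (Python) =====
-- from itertools import combinations
--
-- def calculate_intersections(hvgs_dict, sample_names):
--     # pool of every gene occurring in any of the sample_names sets
--     pool = set()
--     for s in sample_names:
--         pool.update(hvgs_dict[s])
--     out = {}
--     # pairwise counts: scan the pooled genes, never materialize an intersection set
--     for comb in combinations(sample_names, 2):
--         sa, sb = hvgs_dict[comb[0]], hvgs_dict[comb[1]]
--         out[comb] = sum(1 for g in pool if g in sa and g in sb)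
--     # the MG triple and the all-samples combination: streaming count over the first set
--     for comb in (("R-MG", "S-MG", "M-MG"), tuple(sample_names)):
--         first = hvgs_dict[comb[0]]
--         rest = [hvgs_dict[s] for s in comb[1:]]
--         out[comb] = sum(1 for g in first if all(g in t for t in rest))
--     return out
-- ===== Notes on version B (the rewrite author's own statement) =====
-- stated objective: alternative
-- what changed: B never materializes intersection sets: pairwise counts are indicator sums over a single pooled gene universe built once, and the MG-triple and all-samples counts are streaming membership counts over the first set, instead of A's set.intersection(*sets) followed by len.
import Mathlib
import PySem

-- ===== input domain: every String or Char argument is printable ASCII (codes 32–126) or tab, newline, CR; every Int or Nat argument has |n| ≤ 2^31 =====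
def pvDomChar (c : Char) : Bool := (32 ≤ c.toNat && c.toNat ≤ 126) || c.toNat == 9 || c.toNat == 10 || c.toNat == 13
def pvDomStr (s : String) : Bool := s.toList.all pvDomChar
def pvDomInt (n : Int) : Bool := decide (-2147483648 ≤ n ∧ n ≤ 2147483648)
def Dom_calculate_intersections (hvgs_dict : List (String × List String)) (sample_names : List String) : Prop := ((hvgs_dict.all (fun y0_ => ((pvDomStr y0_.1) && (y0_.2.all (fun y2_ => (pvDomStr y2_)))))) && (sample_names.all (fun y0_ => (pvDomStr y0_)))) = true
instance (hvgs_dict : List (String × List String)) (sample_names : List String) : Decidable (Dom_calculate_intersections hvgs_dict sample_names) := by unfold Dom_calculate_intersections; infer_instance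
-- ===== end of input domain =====

-- B replaces A's set.intersection/len pipeline by indicator counting over a pooled gene
-- universe (pairs) and streaming membership counts (MG triple, all-samples tuple); same dict.

-- ===== PORT A =====
-- len(set.intersection(*(hvgs_dict[sample] for sample in comb))); [] case = Python TypeError (outside Pre_)
def pvInterLen (hd : List (String × List String)) (comb : List String) : Int :=
  match comb.map (fun s => (PySem.Dict.mk hd).getD s []) with
  | [] => 0
  | f :: rest => ((rest.foldl (fun acc t => PySem.Set.inter acc t) f).length : Int)

def calculate_intersections (hvgs_dict : List (String × List String)) (sample_names : List String) : List (List String × Int) :=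
  let selected := PySem.List.combinations sample_names 2 ++ [["R-MG", "S-MG", "M-MG"], sample_names]
  (selected.foldl (fun d comb => d.insert comb (pvInterLen hvgs_dict comb)) PySem.Dict.empty).items

-- ===== PORT B =====
-- pool of every gene occurring in any of the sample_names sets
def pvPool (hd : List (String × List String)) (names : List String) : PySem.Set String :=
  names.foldl (fun pool s => PySem.Set.update pool ((PySem.Dict.mk hd).getD s [])) PySem.Set.empty

-- sum(1 for g in pool if g in sa and g in sb); non-pair case unreachable (combinations(_, 2))
def pvPairCount (hd : List (String × List String)) (pool : PySem.Set String) (comb : List String) : Int :=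
  match comb with
  | [a, b] =>
    let sa := (PySem.Dict.mk hd).getD a []
    let sb := (PySem.Dict.mk hd).getD b []
    pool.foldl (fun acc g => if sa.contains g && sb.contains g then acc + 1 else acc) 0
  | _ => 0

-- sum(1 for g in first if all(g in t for t in rest)); [] case = Python IndexError (outside Pre_)
def pvStreamCount (hd : List (String × List String)) (comb : List String) : Int :=
  match comb with
  | [] => 0
  | c :: cs =>
    let first := (PySem.Dict.mk hd).getD c []
    let rest := cs.map (fun s => (PySem.Dict.mk hd).getD s [])
    first.foldl (fun acc g => if rest.all (fun t => t.contains g) then acc + 1 else acc) 0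

def calculate_intersections_alt (hvgs_dict : List (String × List String)) (sample_names : List String) : List (List String × Int) :=
  let pool := pvPool hvgs_dict sample_names
  let d1 := (PySem.List.combinations sample_names 2).foldl
    (fun d comb => d.insert comb (pvPairCount hvgs_dict pool comb)) PySem.Dict.empty
  let d2 := [["R-MG", "S-MG", "M-MG"], sample_names].foldl
    (fun d comb => d.insert comb (pvStreamCount hvgs_dict comb)) d1
  d2.items

-- ===== PRECONDITION & SPEC =====
-- A raises KeyError when a sample of sample_names or one of "R-MG","S-MG","M-MG" is not a key of
-- hvgs_dict, and TypeError (set.intersection with no arguments) when sample_names is empty; those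
-- inputs are excluded. The two Nodup clauses only encode the Python representation (hvgs_dict is a
-- dict of sets: keys unique, each value's elements distinct) — every Python input satisfies them.
def Pre_calculate_intersections (hvgs_dict : List (String × List String)) (sample_names : List String) : Prop :=
  sample_names ≠ [] ∧
  (∀ s ∈ sample_names, s ∈ hvgs_dict.map Prod.fst) ∧
  "R-MG" ∈ hvgs_dict.map Prod.fst ∧ "S-MG" ∈ hvgs_dict.map Prod.fst ∧ "M-MG" ∈ hvgs_dict.map Prod.fst ∧
  (hvgs_dict.map Prod.fst).Nodup ∧
  (∀ p ∈ hvgs_dict, p.2.Nodup)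
instance (hvgs_dict : List (String × List String)) (sample_names : List String) : Decidable (Pre_calculate_intersections hvgs_dict sample_names) := by unfold Pre_calculate_intersections; infer_instance

def pvWitness_calculate_intersections : (List (String × List String)) × List String :=
  ([("R-MG", ["g1", "g2"]), ("S-MG", ["g2"]), ("M-MG", ["g2", "g3"]), ("K", ["g1", "g3"])],
   ["R-MG", "K"])

def Spec_calculate_intersections (hvgs_dict : List (String × List String)) (sample_names : List String) (out : List (List String × Int)) : Prop := out = calculate_intersections_alt hvgs_dict sample_names
instance (hvgs_dict : List (String × List String)) (sample_names : List String) (out : List (List String × Int)) : Decidable (Spec_calculate_intersections hvgs_dict sample_names out) := by unfold Spec_calculate_intersections; infer_instance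

-- ===== CLAIM (what is proved, stated in full; the proofs are below) =====
def Claim_equal_calculate_intersections : Prop := ∀ (hvgs_dict : List (String × List String)) (sample_names : List String), Dom_calculate_intersections hvgs_dict sample_names → Pre_calculate_intersections hvgs_dict sample_names → Spec_calculate_intersections hvgs_dict sample_names (calculate_intersections hvgs_dict sample_names)

-- ===== LEMMAS AND PROOFS =====

-- an iterated Set.inter is one filter by membership in every other set
theorem pv_foldl_inter (ts : List (List String)) (f : List String) :
    ts.foldl (fun acc t => PySem.Set.inter acc t) f
      = f.filter (fun g => ts.all (fun t => t.contains g)) := by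
  induction ts generalizing f with
  | nil => simp
  | cons t ts ih =>
    rw [List.foldl_cons, ih]
    simp [PySem.Set.inter, List.filter_filter, List.all_cons, Bool.and_comm]

-- on any nonempty combination, A's intersection length is B's streaming count
theorem pv_stream_eq (hd : List (String × List String)) (comb : List String) (hne : comb ≠ []) :
    pvInterLen hd comb = pvStreamCount hd comb := by
  cases comb with
  | nil => exact absurd rfl hne
  | cons c cs =>
    simp only [pvInterLen, pvStreamCount, List.map_cons]
    rw [pv_foldl_inter, PySem.List.foldl_if_add_one, List.countP_eq_length_filter]
    simp

-- every value looked up in the dict is Nodup (values are Python sets)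
theorem pv_getD_nodup (hd : List (String × List String)) (h : ∀ p ∈ hd, p.2.Nodup) (s : String) :
    ((PySem.Dict.mk hd).getD s []).Nodup := by
  simp only [PySem.Dict.getD, PySem.Dict.get?]
  cases hfind : List.find? (fun p => p.1 == s) (PySem.Dict.mk hd).items with
  | none => simp
  | some p =>
    have hm : p ∈ hd := List.mem_of_find?_eq_some hfind
    simpa using h p hm

theorem pv_pool_mono (hd : List (String × List String)) (names : List String)
    (acc : PySem.Set String) (g : String) (hg : g ∈ acc) :
    g ∈ names.foldl (fun pool s => PySem.Set.update pool ((PySem.Dict.mk hd).getD s [])) acc := by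
  induction names generalizing acc with
  | nil => simpa using hg
  | cons n ns ih =>
    exact ih _ ((PySem.Set.mem_update _ _ _).mpr (Or.inl hg))

-- the set of a sample of sample_names lies inside the pool
theorem pv_mem_pool_aux (hd : List (String × List String)) (names : List String)
    (acc : PySem.Set String) (a : String) (ha : a ∈ names) (g : String)
    (hg : g ∈ (PySem.Dict.mk hd).getD a []) :
    g ∈ names.foldl (fun pool s => PySem.Set.update pool ((PySem.Dict.mk hd).getD s [])) acc := by
  induction names generalizing acc with
  | nil => cases ha
  | cons n ns ih =>
    rcases List.mem_cons.mp ha with rfl | ha'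
    · exact pv_pool_mono hd ns _ g ((PySem.Set.mem_update _ _ _).mpr (Or.inr hg))
    · exact ih _ ha'

theorem pv_pool_nodup_aux (hd : List (String × List String)) (names : List String)
    (acc : PySem.Set String) (hacc : acc.Nodup) :
    (names.foldl (fun pool s => PySem.Set.update pool ((PySem.Dict.mk hd).getD s [])) acc).Nodup := by
  induction names generalizing acc with
  | nil => simpa using hacc
  | cons n ns ih => exact ih _ (PySem.Set.nodup_update _ _ hacc)

-- pair values agree: counting pooled genes belonging to both sets = |sa ∩ sb|
theorem pv_pair_eq (hd : List (String × List String)) (names : List String)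
    (hval : ∀ p ∈ hd, p.2.Nodup)
    (comb : List String) (hc : comb ∈ PySem.List.combinations names 2) :
    pvInterLen hd comb = pvPairCount hd (pvPool hd names) comb := by
  obtain ⟨hsub, hlen⟩ := (PySem.List.mem_combinations_iff _ _ _).mp hc
  match comb, hlen with
  | [a, b], _ =>
    have ha : a ∈ names := hsub.subset (by simp)
    have hb : b ∈ names := hsub.subset (by simp)
    simp only [pvInterLen, pvPairCount, List.map_cons, List.map_nil, List.foldl_cons,
      List.foldl_nil]
    rw [PySem.List.foldl_if_add_one, List.countP_eq_length_filter]
    have hperm : ((pvPool hd names).filter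
        (fun g => ((PySem.Dict.mk hd).getD a []).contains g
          && ((PySem.Dict.mk hd).getD b []).contains g)).Perm
        (PySem.Set.inter ((PySem.Dict.mk hd).getD a []) ((PySem.Dict.mk hd).getD b [])) := by
      simp only [pvPool, PySem.Set.empty]
      rw [List.perm_ext_iff_of_nodup
        ((pv_pool_nodup_aux hd names _ List.nodup_nil).filter _)
        (PySem.Set.nodup_inter _ _ (pv_getD_nodup hd hval a))]
      intro x
      simp only [List.mem_filter, PySem.Set.inter, Bool.and_eq_true,
        PySem.Set.contains_eq_listContains, List.contains_iff_mem]
      constructor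
      · rintro ⟨_, hxa, hxb⟩; exact ⟨hxa, hxb⟩
      · rintro ⟨hxa, hxb⟩
        exact ⟨pv_mem_pool_aux hd names _ a ha x hxa, hxa, hxb⟩
    have := hperm.length_eq
    omega

-- ===== VERDICT (by name: the statement is the Claim_ definition above) =====
theorem calculate_intersections_spec : Claim_equal_calculate_intersections := by
  intro hd names _ hpre
  obtain ⟨hne, _, _, _, _, _, hval⟩ := hpre
  show calculate_intersections hd names = calculate_intersections_alt hd names
  simp only [calculate_intersections, calculate_intersections_alt]
  rw [List.foldl_append]
  have h1 : (PySem.List.combinations names 2).foldl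
      (fun d comb => d.insert comb (pvInterLen hd comb)) PySem.Dict.empty
    = (PySem.List.combinations names 2).foldl
      (fun d comb => d.insert comb (pvPairCount hd (pvPool hd names) comb)) PySem.Dict.empty :=
    PySem.List.foldl_congr_mem' _ _ _ _
      (fun comb hc acc => by simp only [pv_pair_eq hd names hval comb hc])
  have h2 : ∀ d0 : PySem.Dict (List String) Int,
      ([["R-MG", "S-MG", "M-MG"], names]).foldl
        (fun d comb => d.insert comb (pvInterLen hd comb)) d0
    = ([["R-MG", "S-MG", "M-MG"], names]).foldl
        (fun d comb => d.insert comb (pvStreamCount hd comb)) d0 := fun d0 =>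
    PySem.List.foldl_congr_mem' _ _ _ _
      (fun comb hc acc => by
        rcases List.mem_cons.mp hc with rfl | hc'
        · simp only [pv_stream_eq hd _ (by simp : (["R-MG", "S-MG", "M-MG"] : List String) ≠ [])]
        · rcases List.mem_cons.mp hc' with rfl | h
          · simp only [pv_stream_eq hd _ hne]
          · cases h)
  rw [h1, h2]
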